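-- pv_equiv track=rewrite | github.com/AlexAltea/blog | posts/2016-10-12-xchg-rax-rax-solutions/xorpd_0x3d_morton.py | disinterleave
-- ===== SOURCE A (Python) =====
-- def disinterleave(z):
--     x = 0
--     y = 0
--     k = 0
--     while z:
--         x |= (z & 1) << k
--         y |= (z & 2) << k
--         z >>= 2
--         k += 1
--     y >>= 1
--     return x, y
-- ===== SOURCE B (Python) =====
-- def disinterleave(z):
--     s = bin(z)[2:][::-1]          # bits of z, LSB first
--     x = int(s[0::2][::-1] or '0', 2)   # even-position bits
--     y = int(s[1::2][::-1] or '0', 2)   # odd-position bits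
--     return x, y
-- ===== Notes on version B (the rewrite author's own statement) =====
-- stated objective: alternative
-- what changed: A's per-bit-pair mask/or/shift accumulator loop is replaced by converting z to its binary digit string once and separating even- and odd-position bits with two strided slices that are parsed back with int(-,2).
import Mathlib
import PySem

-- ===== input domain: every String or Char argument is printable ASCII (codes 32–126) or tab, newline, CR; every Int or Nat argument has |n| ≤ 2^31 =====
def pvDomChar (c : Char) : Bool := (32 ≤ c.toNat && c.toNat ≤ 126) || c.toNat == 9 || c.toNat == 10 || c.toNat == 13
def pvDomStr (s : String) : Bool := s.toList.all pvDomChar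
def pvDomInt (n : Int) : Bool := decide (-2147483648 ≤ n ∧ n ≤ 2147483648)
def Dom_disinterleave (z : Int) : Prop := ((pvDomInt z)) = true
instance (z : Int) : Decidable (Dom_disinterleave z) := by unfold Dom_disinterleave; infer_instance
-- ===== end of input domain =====

-- B replaces A's per-bit-pair mask/or/shift loop by extracting the whole binary digit
-- string once and separating even/odd positions with strided slices (objective: alternative).

-- ===== PORT A =====
-- the while loop; Python's 'while z:' never terminates for z < 0 (z >>= 2 stalls at -1),
-- so the guard is '0 < z': identical to 'z != 0' on Pre_ (0 ≤ z), totalizing elsewhere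
def disinterleaveLoop (z x y : Int) (k : Nat) : Int × Int :=
  if h : 0 < z then
    disinterleaveLoop (z >>> (2 : Nat))
      (PySem.Int.bor x (PySem.Int.band z 1 <<< k))
      (PySem.Int.bor y (PySem.Int.band z 2 <<< k)) (k + 1)
  else (x, y)
termination_by z.toNat
decreasing_by
  have hz : z = (z.toNat : Int) := by omega
  have h2 : z >>> (2 : Nat) = ((z.toNat >>> 2 : Nat) : Int) := by
    conv_lhs => rw [hz]
    simp
  rw [h2, Int.toNat_natCast, Nat.shiftRight_eq_div_pow]
  omega

def disinterleave (z : Int) : Int × Int :=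
  let p := disinterleaveLoop z 0 0 0
  (p.1, p.2 >>> (1 : Nat))

-- ===== PORT B =====
-- bin(z)[2:] as a char list, MSB first — hand port of the builtin, exact for z ≥ 0
def pyBinBit (z : Int) : Char := if PySem.Int.band z 1 == 1 then '1' else '0'

def pyBin (z : Int) : List Char :=
  if _h : 1 < z then pyBin (z >>> (1 : Nat)) ++ [pyBinBit z] else [pyBinBit z]
termination_by z.toNat
decreasing_by
  have hz : z = (z.toNat : Int) := by omega
  have h2 : z >>> (1 : Nat) = ((z.toNat >>> 1 : Nat) : Int) := by
    conv_lhs => rw [hz]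
    simp
  rw [h2, Int.toNat_natCast, Nat.shiftRight_eq_div_pow]
  omega

-- s[0::2] — the step-2 slice from index 0 (s[1::2] is stride2 (s.drop 1)); exact
def stride2 {α : Type} : List α → List α
  | [] => []
  | [a] => [a]
  | a :: _ :: t => a :: stride2 t

-- int(cs, 2); on [] it yields 0, which is exactly int('' or '0', 2); exact for '0'/'1' chars
def parseBin (cs : List Char) : Int :=
  cs.foldl (fun acc c => 2 * acc + (if c == '1' then 1 else 0)) 0

def disinterleave_alt (z : Int) : Int × Int :=
  let s := (pyBin z).reverse
  (parseBin (stride2 s).reverse, parseBin (stride2 (s.drop 1)).reverse)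

-- ===== PRECONDITION & SPEC =====
-- Pre_ excludes z < 0 only: there Python A's 'while z' never terminates (z >>= 2 stalls at -1)
def Pre_disinterleave (z : Int) : Prop := 0 ≤ z
instance (z : Int) : Decidable (Pre_disinterleave z) := by unfold Pre_disinterleave; infer_instance
def pvWitness_disinterleave : Int := (38)
def Spec_disinterleave (z : Int) (out : Int × Int) : Prop := out = disinterleave_alt z
instance (z : Int) (out : Int × Int) : Decidable (Spec_disinterleave z out) := by unfold Spec_disinterleave; infer_instance

-- ===== CLAIM (what is proved, stated in full; the proofs are below) =====
def Claim_equal_disinterleave : Prop := ∀ (z : Int), Dom_disinterleave z → Pre_disinterleave z → Spec_disinterleave z (disinterleave z)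

-- ===== LEMMAS AND PROOFS =====

-- the even-position bits of n as a number; fx n = n%2 + 2*fx (n/4), and the
-- odd-position bits of n are fx (n/2)
def fx (n : Nat) : Nat :=
  if n = 0 then 0 else n % 2 + 2 * fx (n / 4)
decreasing_by omega

theorem fx_zero : fx 0 = 0 := by rw [fx]; simp

theorem fx_eq (n : Nat) : fx n = n % 2 + 2 * fx (n / 4) := by
  by_cases h : n = 0
  · subst h; simp [fx_zero]
  · rw [fx]; simp [h]

theorem fx_one : fx 1 = 1 := by rw [fx_eq]; norm_num [fx_zero]

-- disjoint OR is addition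
theorem lor_mul_pow_eq_add (a b k : Nat) (h : a < 2 ^ k) :
    a ||| (b * 2 ^ k) = a + b * 2 ^ k := by
  have hc : a + b * 2 ^ k = 2 ^ k * b + a := by ring
  rw [hc, ← Nat.shiftLeft_eq]
  apply Nat.eq_of_testBit_eq
  intro j
  rw [Nat.testBit_lor, Nat.testBit_shiftLeft, Nat.testBit_two_pow_mul_add b h]
  by_cases hj : j < k
  · simp [hj, Nat.not_le.mpr hj]
  · have hk : k ≤ j := Nat.not_lt.mp hj
    have ha : a.testBit j = false :=
      Nat.testBit_lt_two_pow (lt_of_lt_of_le h (Nat.pow_le_pow_right (by norm_num) hk))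
    simp [hj, hk, ha]

theorem and_one_eq (n : Nat) : n &&& 1 = n % 2 := Nat.and_one_is_mod n

theorem and_two_eq (n : Nat) : n &&& 2 = 2 * (n / 2 % 2) := by
  have h := Nat.and_two_pow n 1
  have ht : n.testBit 1 = decide (n / 2 % 2 = 1) := by
    rw [show (1 : Nat) = 0 + 1 from rfl, Nat.testBit_succ, Nat.testBit_zero]
  rcases Nat.mod_two_eq_zero_or_one (n / 2) with h1 | h1 <;>
    simp [ht, h1] at h <;> omega

theorem loopA_eq (n : Nat) : ∀ (x y k : Nat), x < 2 ^ k → y < 2 ^ (k + 1) →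
    disinterleaveLoop (↑n) (↑x) (↑y) k =
      (((x + fx n * 2 ^ k : Nat) : Int), ((y + fx (n / 2) * 2 ^ (k + 1) : Nat) : Int)) := by
  induction n using Nat.strong_induction_on with
  | _ n ih =>
    intro x y k hx hy
    rw [disinterleaveLoop]
    by_cases hn : n = 0
    · subst hn; simp [fx_zero]
    · have hpos : (0 : Int) < ↑n := by exact_mod_cast Nat.pos_of_ne_zero hn
      rw [dif_pos hpos]
      have hsr : (↑n : Int) >>> (2 : Nat) = ((n / 4 : Nat) : Int) := by
        rw [show ((n / 4 : Nat) : Int) = ((n >>> 2 : Nat) : Int) by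
          rw [Nat.shiftRight_eq_div_pow]]
        simp
      have hb1 : PySem.Int.band (↑n) 1 = ((n &&& 1 : Nat) : Int) := by
        exact_mod_cast PySem.Int.band_natCast n 1
      have hb2 : PySem.Int.band (↑n) 2 = ((n &&& 2 : Nat) : Int) := by
        exact_mod_cast PySem.Int.band_natCast n 2
      have hx' : PySem.Int.bor (↑x) (((n &&& 1 : Nat) : Int) <<< k) =
          (((x ||| ((n &&& 1) <<< k) : Nat)) : Int) := by
        rw [show (((n &&& 1 : Nat) : Int)) <<< k = (((n &&& 1) <<< k : Nat) : Int) by simp]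
        exact_mod_cast PySem.Int.bor_natCast x ((n &&& 1) <<< k)
      have hy' : PySem.Int.bor (↑y) (((n &&& 2 : Nat) : Int) <<< k) =
          (((y ||| ((n &&& 2) <<< k) : Nat)) : Int) := by
        rw [show (((n &&& 2 : Nat) : Int)) <<< k = (((n &&& 2) <<< k : Nat) : Int) by simp]
        exact_mod_cast PySem.Int.bor_natCast y ((n &&& 2) <<< k)
      rw [hsr, hb1, hb2, hx', hy']
      have e1 : x ||| ((n &&& 1) <<< k) = x + (n % 2) * 2 ^ k := by
        rw [Nat.shiftLeft_eq, and_one_eq, lor_mul_pow_eq_add x (n % 2) k hx]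
      have e2 : y ||| ((n &&& 2) <<< k) = y + (n / 2 % 2) * 2 ^ (k + 1) := by
        rw [Nat.shiftLeft_eq, and_two_eq,
          show 2 * (n / 2 % 2) * 2 ^ k = (n / 2 % 2) * 2 ^ (k + 1) by ring,
          lor_mul_pow_eq_add y (n / 2 % 2) (k + 1) hy]
      rw [e1, e2]
      have hlt : n / 4 < n := by omega
      have b1 : x + n % 2 * 2 ^ k < 2 ^ (k + 1) := by
        have h2 : 2 ^ (k + 1) = 2 * 2 ^ k := by ring
        have hm : n % 2 ≤ 1 := by omega
        nlinarith
      have b2 : y + n / 2 % 2 * 2 ^ (k + 1) < 2 ^ (k + 1 + 1) := by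
        have h2 : 2 ^ (k + 1 + 1) = 2 * 2 ^ (k + 1) := by ring
        have hm : n / 2 % 2 ≤ 1 := by omega
        nlinarith
      rw [ih (n / 4) hlt _ _ (k + 1) b1 b2]
      have gx : x + n % 2 * 2 ^ k + fx (n / 4) * 2 ^ (k + 1) = x + fx n * 2 ^ k := by
        rw [fx_eq n]; ring
      have gy : y + n / 2 % 2 * 2 ^ (k + 1) + fx (n / 4 / 2) * 2 ^ (k + 1 + 1)
          = y + fx (n / 2) * 2 ^ (k + 1) := by
        rw [fx_eq (n / 2), show n / 2 / 4 = n / 4 / 2 by omega]; ring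
      rw [gx, gy]

-- pyBin on naturals: the two unfoldings
theorem pyBin_small (n : Nat) (h : n ≤ 1) : pyBin ↑n = [pyBinBit ↑n] := by
  rw [pyBin, dif_neg (by exact_mod_cast by omega : ¬ (1 : Int) < ↑n)]

theorem pyBin_big (n : Nat) (h : 2 ≤ n) : pyBin ↑n = pyBin ↑(n / 2) ++ [pyBinBit ↑n] := by
  rw [pyBin, dif_pos (by exact_mod_cast by omega : (1 : Int) < ↑n)]
  rw [show (↑n : Int) >>> (1 : Nat) = ((n / 2 : Nat) : Int) by
    rw [Int.shiftRight_eq_div_pow]; push_cast; omega]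

theorem rev_pyBin_cons (m : Nat) :
    (pyBin ↑m).reverse = pyBinBit ↑m :: ((pyBin ↑m).reverse).tail := by
  by_cases h : 2 ≤ m
  · rw [pyBin_big m h]; simp
  · rw [pyBin_small m (by omega)]; simp

theorem bit_val (n : Nat) :
    (if pyBinBit ↑n == '1' then (1 : Int) else 0) = ((n % 2 : Nat) : Int) := by
  unfold pyBinBit
  rw [show PySem.Int.band ↑n 1 = ((n &&& 1 : Nat) : Int) from by
        exact_mod_cast PySem.Int.band_natCast n 1,
      and_one_eq]
  rcases Nat.mod_two_eq_zero_or_one n with h | h <;> simp [h]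

theorem parse_snoc (l : List Char) (c : Char) :
    parseBin (l ++ [c]) = 2 * parseBin l + (if c == '1' then 1 else 0) := by
  simp [parseBin, List.foldl_append]

theorem parse_rev_cons (c : Char) (t : List Char) :
    parseBin ((c :: t).reverse) = (if c == '1' then 1 else 0) + 2 * parseBin t.reverse := by
  rw [List.reverse_cons, parse_snoc]; ring

theorem B_eq (n : Nat) :
    parseBin (stride2 ((pyBin ↑n).reverse)).reverse = ((fx n : Nat) : Int) ∧
    parseBin (stride2 (((pyBin ↑n).reverse).drop 1)).reverse = ((fx (n / 2) : Nat) : Int) := by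
  induction n using Nat.strong_induction_on with
  | _ n ih =>
    by_cases h : 2 ≤ n
    · have hrev : (pyBin ↑n).reverse = pyBinBit ↑n :: (pyBin ↑(n / 2)).reverse := by
        rw [pyBin_big n h]; simp
      have hrev2 : (pyBin ↑(n / 2)).reverse
          = pyBinBit ↑(n / 2) :: ((pyBin ↑(n / 2)).reverse).tail := rev_pyBin_cons (n / 2)
      obtain ⟨ih1, ih2⟩ := ih (n / 2) (by omega)
      constructor
      · rw [hrev, hrev2, stride2, parse_rev_cons, bit_val]
        rw [show ((pyBin ↑(n / 2)).reverse).tail = ((pyBin ↑(n / 2)).reverse).drop 1 by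
          rw [List.drop_one]]
        rw [ih2, fx_eq n, show n / 2 / 2 = n / 4 by omega]
        push_cast
        ring
      · rw [hrev, List.drop_one, List.tail_cons, ih1]
    · interval_cases n
      · have hb0 : pyBinBit ((0 : Nat) : Int) = '0' := by decide
        rw [pyBin_small 0 (by norm_num), hb0]
        refine ⟨?_, ?_⟩ <;> simp [stride2, parseBin, fx_zero]
      · have hb1 : pyBinBit ((1 : Nat) : Int) = '1' := by decide
        rw [pyBin_small 1 (by norm_num), hb1]
        refine ⟨?_, ?_⟩ <;> simp [stride2, parseBin, fx_zero, fx_one]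

-- ===== VERDICT (by name: the statement is the Claim_ definition above) =====
theorem disinterleave_spec : Claim_equal_disinterleave := by
  intro z hdom hpre
  unfold Pre_disinterleave at hpre
  unfold Spec_disinterleave
  obtain ⟨n, rfl⟩ : ∃ n : Nat, z = ↑n := ⟨z.toNat, by omega⟩
  have hA := loopA_eq n 0 0 0 (by norm_num) (by norm_num)
  push_cast at hA
  norm_num at hA
  obtain ⟨hB1, hB2⟩ := B_eq n
  simp only [disinterleave, disinterleave_alt]
  rw [hB1, hB2, hA]
  have hy : ((fx (n / 2) * 2 : Nat) : Int) >>> (1 : Nat) = ((fx (n / 2) : Nat) : Int) := by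
    rw [Int.shiftRight_eq_div_pow]
    push_cast
    omega
  push_cast at hy ⊢
  rw [hy]
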